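-- pv_equiv track=rewrite | github.com/andre-tm-hui/LearningTetris | submission/heuristics.py | score_bumps
-- ===== SOURCE A (Python) =====
-- def score_bumps(board_highest):
-- 	jagged_score = 0
-- 	slope_score = 0
-- 	for x in range(8):
-- 		diff = board_highest[x] - board_highest[x+1]
-- 		jagged_score += abs(diff)
-- 		slope_score -= diff
--
-- 	return jagged_score, slope_score
-- ===== SOURCE B (Python) =====
-- def score_bumps(board_highest):
-- 	jagged_score = sum(abs(board_highest[x] - board_highest[x+1]) for x in range(8))
-- 	slope_score = board_highest[8] - board_highest[0]
-- 	return jagged_score, slope_score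
-- ===== Notes on version B (the rewrite author's own statement) =====
-- stated objective: simpler
-- what changed: The running slope accumulation over the 8 differences is replaced by its telescoping closed form board_highest[8] - board_highest[0], and the jagged sum becomes a single comprehension; no loop state is maintained.
import Mathlib
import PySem

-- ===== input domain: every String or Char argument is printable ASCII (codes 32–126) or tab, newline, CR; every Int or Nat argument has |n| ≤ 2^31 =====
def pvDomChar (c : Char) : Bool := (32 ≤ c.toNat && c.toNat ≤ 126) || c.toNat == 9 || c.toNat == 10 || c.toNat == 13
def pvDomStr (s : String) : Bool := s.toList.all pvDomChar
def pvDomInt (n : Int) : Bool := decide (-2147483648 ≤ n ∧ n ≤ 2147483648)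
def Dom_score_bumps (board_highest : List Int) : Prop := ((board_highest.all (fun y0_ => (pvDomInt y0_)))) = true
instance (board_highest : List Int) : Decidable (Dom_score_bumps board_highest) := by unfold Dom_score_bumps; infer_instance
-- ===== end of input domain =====

-- B replaces A's running slope accumulator with its telescoping closed form bh[8] - bh[0] (objective: simpler).

-- ===== PORT A =====
-- loop over range(8) carrying the pair (jagged_score, slope_score); pyGet? with getD is exact under Pre_ (indices 0..8 are in range)
def score_bumps (board_highest : List Int) : Int × Int :=
  (PySem.List.pyRange 0 8 1).foldl
    (fun (acc : Int × Int) x =>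
      let diff := (PySem.List.pyGet? board_highest x).getD 0 - (PySem.List.pyGet? board_highest (x + 1)).getD 0
      (acc.1 + |diff|, acc.2 - diff))
    (0, 0)

-- ===== PORT B =====
def score_bumps_alt (board_highest : List Int) : Int × Int :=
  let jagged_score :=
    ((PySem.List.pyRange 0 8 1).map
      (fun x => |(PySem.List.pyGet? board_highest x).getD 0 - (PySem.List.pyGet? board_highest (x + 1)).getD 0|)).sum
  let slope_score := (PySem.List.pyGet? board_highest 8).getD 0 - (PySem.List.pyGet? board_highest 0).getD 0
  (jagged_score, slope_score)

-- ===== PRECONDITION & SPEC =====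
-- Pre_ excludes exactly the boards with fewer than 9 columns, on which A raises IndexError at board_highest[x+1].
def Pre_score_bumps (board_highest : List Int) : Prop := 9 ≤ board_highest.length
instance (board_highest : List Int) : Decidable (Pre_score_bumps board_highest) := by unfold Pre_score_bumps; infer_instance
def pvWitness_score_bumps : List Int := [3, 1, 4, 1, 5, 9, 2, 6, 5]

def Spec_score_bumps (board_highest : List Int) (out : Int × Int) : Prop := out = score_bumps_alt board_highest
instance (board_highest : List Int) (out : Int × Int) : Decidable (Spec_score_bumps board_highest out) := by unfold Spec_score_bumps; infer_instance

-- ===== CLAIM (what is proved, stated in full; the proofs are below) =====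
def Claim_equal_score_bumps : Prop := ∀ (board_highest : List Int), Dom_score_bumps board_highest → Pre_score_bumps board_highest → Spec_score_bumps board_highest (score_bumps board_highest)

-- ===== LEMMAS AND PROOFS =====

-- ===== VERDICT (by name: the statement is the Claim_ definition above) =====
theorem score_bumps_spec : Claim_equal_score_bumps := by
  intro bh _ hpre
  unfold Pre_score_bumps at hpre
  rcases bh with _ | ⟨a0, bh⟩; · simp at hpre
  rcases bh with _ | ⟨a1, bh⟩; · simp at hpre
  rcases bh with _ | ⟨a2, bh⟩; · simp at hpre
  rcases bh with _ | ⟨a3, bh⟩; · simp at hpre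
  rcases bh with _ | ⟨a4, bh⟩; · simp at hpre
  rcases bh with _ | ⟨a5, bh⟩; · simp at hpre
  rcases bh with _ | ⟨a6, bh⟩; · simp at hpre
  rcases bh with _ | ⟨a7, bh⟩; · simp at hpre
  rcases bh with _ | ⟨a8, bh⟩; · simp at hpre
  unfold Spec_score_bumps score_bumps score_bumps_alt
  have hr : PySem.List.pyRange 0 8 1 =
      [((0:Nat):Int), ((1:Nat):Int), ((2:Nat):Int), ((3:Nat):Int),
       ((4:Nat):Int), ((5:Nat):Int), ((6:Nat):Int), ((7:Nat):Int)] := by decide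
  have hc : ∀ k : Nat, ((k:Int) + 1) = (((k+1:Nat)):Int) := by intro k; push_cast; ring
  have g8 : PySem.List.pyGet? (a0 :: a1 :: a2 :: a3 :: a4 :: a5 :: a6 :: a7 :: a8 :: bh) 8
      = some a8 := by
    rw [PySem.List.pyGet?_of_nonneg (h := by norm_num)]; rfl
  have g0 : PySem.List.pyGet? (a0 :: a1 :: a2 :: a3 :: a4 :: a5 :: a6 :: a7 :: a8 :: bh) 0
      = some a0 := by
    rw [PySem.List.pyGet?_of_nonneg (h := by norm_num)]; rfl
  simp only [hr, List.foldl_cons, List.foldl_nil, List.map_cons, List.map_nil,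
    List.sum_cons, List.sum_nil, hc, g8, g0, PySem.List.pyGet?_natCast]
  simp [Prod.ext_iff]
  ring
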